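-- pv_equiv track=rewrite | github.com/t10le/cryptography-calculator | crypto_calc.py | convert_to_plaintext
-- ===== SOURCE A (Python) =====
-- def convert_to_plaintext(s: str) -> str:
--     """Returns the plaintext of a string.
--
--     # Example
--         >>> convert_to_plaintext('PUPPIESARESMALL')
--         '152015 150804 180017 041812 001111'
--
--     :param s: The string (message) to converted into plain text for eventual ciphertext conversion.
--     """
--     result = ''
--     s = s.upper()
--     for i in range(len(s)):
--         if i % 3 != 0 or i == 0:
--             result += ASCII[s[i]]
--         else:
--             result += ' ' + ASCII[s[i]]
--     return result
--
-- ASCII = {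
--     'A': '00', 'B': '01', 'C': '02', 'D': '03', 'E': '04',
--     'F': '05', 'G': '06', 'H': '07', 'I': '08', 'J': '09',
--     'K': '10', 'L': '11', 'M': '12', 'N': '13', 'O': '14',
--     'P': '15', 'Q': '16', 'R': '17', 'S': '18', 'T': '19',
--     'U': '20', 'V': '21', 'W': '22', 'X': '23', 'Y': '24',
--     'Z': '25', ' ': '26'
-- }
-- ===== SOURCE B (Python) =====
-- ALPHABET = 'ABCDEFGHIJKLMNOPQRSTUVWXYZ '
--
--
-- def _code(c):
--     """Two-digit code of one character: its position in ALPHABET, zero-padded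
--     (raises ValueError on any other character)."""
--     return '%02d' % ALPHABET.index(c)
--
--
-- def convert_to_plaintext(s: str) -> str:
--     """Uppercase the message, peel off 3-character groups (each encoded as the
--     concatenation of its characters' codes), and join the groups with spaces."""
--     t = s.upper()
--     groups = []
--     while t:
--         groups.append(''.join(_code(c) for c in t[:3]))
--         t = t[3:]
--     return ' '.join(groups)
-- ===== Notes on version B (the rewrite author's own statement) =====
-- stated objective: alternative
-- what changed: B drops the ASCII dict, computing each 2-digit code as the character's position in the ALPHABET string via str.index with zero-padding, and replaces A's per-index i%3 space-insertion loop by a loop that peels off 3-character groups and space-joins them.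
import Mathlib
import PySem

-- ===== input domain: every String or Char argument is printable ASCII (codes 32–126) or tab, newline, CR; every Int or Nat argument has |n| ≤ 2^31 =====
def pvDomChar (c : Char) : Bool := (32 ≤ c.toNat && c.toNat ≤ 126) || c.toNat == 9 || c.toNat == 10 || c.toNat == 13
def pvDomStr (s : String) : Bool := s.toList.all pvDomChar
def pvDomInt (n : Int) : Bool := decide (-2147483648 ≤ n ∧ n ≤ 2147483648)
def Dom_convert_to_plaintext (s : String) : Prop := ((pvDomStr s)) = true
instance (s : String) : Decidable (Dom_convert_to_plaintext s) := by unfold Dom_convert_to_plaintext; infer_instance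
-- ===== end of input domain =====

-- B drops A's ASCII dict (each code is the character's position in the ALPHABET string,
-- zero-padded) and replaces the per-index i % 3 space-insertion loop by a recursive
-- 3-character grouping joined with spaces (objective: alternative).

-- ===== PORT A =====

-- the module constant ASCII used by the Python A
def pvASCII : PySem.Dict String String := PySem.Dict.ofList
  [("A", "00"), ("B", "01"), ("C", "02"), ("D", "03"), ("E", "04"),
   ("F", "05"), ("G", "06"), ("H", "07"), ("I", "08"), ("J", "09"),
   ("K", "10"), ("L", "11"), ("M", "12"), ("N", "13"), ("O", "14"),
   ("P", "15"), ("Q", "16"), ("R", "17"), ("S", "18"), ("T", "19"),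
   ("U", "20"), ("V", "21"), ("W", "22"), ("X", "23"), ("Y", "24"),
   ("Z", "25"), (" ", "26")]

-- ASCII[c] for a one-character string; the .getD "" covers the KeyError case, which Pre_ excludes
def pvCode (c : Char) : String := (PySem.Dict.get? pvASCII (String.ofList [c])).getD ""

def convert_to_plaintext (s : String) : String :=
  let u := (PySem.Str.upper s).toList          -- s = s.upper()
  (PySem.List.pyRange 0 (PySem.List.len u) 1).foldl
    (fun result i =>
      if PySem.Int.mod i 3 != 0 || i == 0 then
        result ++ pvCode (PySem.List.pyGetD u i ' ')
      else
        result ++ " " ++ pvCode (PySem.List.pyGetD u i ' ')) ""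

-- ===== PORT B =====

-- Source B's module constant ALPHABET
def pvALPHABET : List Char := "ABCDEFGHIJKLMNOPQRSTUVWXYZ ".toList

-- Source B's _code: '%02d' % ALPHABET.index(c); the .getD 0 covers the ValueError case,
-- which Pre_ excludes
def pvCodeB (c : Char) : String :=
  PySem.Str.zfill (PySem.Int.toStr ((PySem.List.index? pvALPHABET c).getD 0)) 2

-- Source B's while loop: peel the first 3 characters off t as one encoded group, append it
def pvGroupsLoop : List Char → List String → List String
  | [], groups => groups
  | a :: rest, groups =>
      pvGroupsLoop ((a :: rest).drop 3)
        (groups ++ [PySem.Str.join "" (((a :: rest).take 3).map pvCodeB)])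
  termination_by t _ => t.length
  decreasing_by simp only [List.drop_succ_cons, List.length_drop, List.length_cons]; omega

def convert_to_plaintext_alt (s : String) : String :=
  PySem.Str.join " " (pvGroupsLoop ((PySem.Str.upper s).toList) [])

-- ===== PRECONDITION & SPEC =====
-- Pre_ excludes exactly the strings containing a character other than a letter or a space,
-- on which Python A raises KeyError (ASCII[s[i]] on a key missing from the dict).
def Pre_convert_to_plaintext (s : String) : Prop :=
  (s.toList.all (fun c =>
    c == ' ' || ('A' ≤ c && c ≤ 'Z') || ('a' ≤ c && c ≤ 'z'))) = true
instance (s : String) : Decidable (Pre_convert_to_plaintext s) := by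
  unfold Pre_convert_to_plaintext; infer_instance

def pvWitness_convert_to_plaintext : String := "Puppies Are Small"

def Spec_convert_to_plaintext (s : String) (out : String) : Prop := out = convert_to_plaintext_alt s
instance (s : String) (out : String) : Decidable (Spec_convert_to_plaintext s out) := by
  unfold Spec_convert_to_plaintext; infer_instance

-- ===== CLAIM (what is proved, stated in full; the proofs are below) =====
def Claim_equal_convert_to_plaintext : Prop := ∀ (s : String), Dom_convert_to_plaintext s → Pre_convert_to_plaintext s → Spec_convert_to_plaintext s (convert_to_plaintext s)

-- ===== LEMMAS AND PROOFS =====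

-- the 3-character chunks of a list
def chunks3 : List Char → List (List Char)
  | [] => []
  | [a] => [[a]]
  | [a, b] => [[a, b]]
  | a :: b :: c :: rest => [a, b, c] :: chunks3 rest

-- B's accumulator loop, rephrased as plain recursion (proof helper)
def pvGroupsB : List Char → List String
  | [] => []
  | a :: rest =>
      PySem.Str.join "" (((a :: rest).take 3).map pvCodeB) :: pvGroupsB ((a :: rest).drop 3)
  termination_by t => t.length
  decreasing_by simp only [List.drop_succ_cons, List.length_drop, List.length_cons]; omega

-- the codes of one chunk, concatenated (list-of-chars view), A's dict resp. B's index
def grpL (ch : List Char) : List Char := (ch.map (fun c => (pvCode c).toList)).flatten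
def grpLB (ch : List Char) : List Char := (ch.map (fun c => (pvCodeB c).toList)).flatten

-- the tail of A's output: every chunk at a positive index-multiple of 3 is preceded by ' '
def tailL (l : List Char) : List Char := ((chunks3 l).map (fun ch => ' ' :: grpL ch)).flatten

-- A's loop body, seen as a step over enumerate
def aStep (r : String) (p : Int × Char) : String :=
  if PySem.Int.mod p.1 3 != 0 || p.1 == 0 then r ++ pvCode p.2
  else r ++ " " ++ pvCode p.2

lemma cond_mul3 (i : Int) (h3 : i % 3 = 0) (h0 : i ≠ 0) :
    (PySem.Int.mod i 3 != 0 || i == 0) = false := by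
  have hd : (3 : Int) ∣ i := Int.dvd_of_emod_eq_zero h3
  simp [hd, h0]

lemma cond_other (i : Int) (h : i % 3 ≠ 0 ∨ i = 0) :
    (PySem.Int.mod i 3 != 0 || i == 0) = true := by
  rcases h with h | h
  · have hd : ¬ (3 : Int) ∣ i := fun hd => h (Int.emod_eq_zero_of_dvd hd)
    simp [hd]
  · simp [h]

lemma A_eq_enum (s : String) :
    convert_to_plaintext s =
      List.foldl aStep "" (PySem.List.enumerate ((PySem.Str.upper s).toList) 0) := by
  unfold convert_to_plaintext
  rw [PySem.List.enumerate_eq_map_pyRange ((PySem.Str.upper s).toList) ' ', List.foldl_map]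
  rfl

lemma tailA (l : List Char) : ∀ (k : Nat) (acc : String),
    (List.foldl aStep acc (PySem.List.enumerate l (3 * ((k : Int) + 1)))).toList
      = acc.toList ++ tailL l := by
  induction l using chunks3.induct with
  | case1 =>
      intro k acc
      simp [PySem.List.enumerate_nil, tailL, chunks3]
  | case2 a =>
      intro k acc
      simp only [PySem.List.enumerate_cons, PySem.List.enumerate_nil, List.foldl]
      rw [show aStep acc (3 * ((k : Int) + 1), a)
            = acc ++ " " ++ pvCode a from by
            simp only [aStep]; rw [cond_mul3 (3 * ((k : Int) + 1)) (by omega) (by omega)]; simp]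
      simp [tailL, chunks3, grpL, String.toList_append]
  | case3 a b =>
      intro k acc
      simp only [PySem.List.enumerate_cons, PySem.List.enumerate_nil, List.foldl]
      rw [show aStep acc (3 * ((k : Int) + 1), a)
            = acc ++ " " ++ pvCode a from by
            simp only [aStep]; rw [cond_mul3 (3 * ((k : Int) + 1)) (by omega) (by omega)]; simp,
          show ∀ r, aStep r (3 * ((k : Int) + 1) + 1, b) = r ++ pvCode b from fun r => by
            simp only [aStep]; rw [cond_other (3 * ((k : Int) + 1) + 1) (Or.inl (by omega))]; simp]
      simp [tailL, chunks3, grpL, String.toList_append]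
  | case4 a b c rest ih =>
      intro k acc
      simp only [PySem.List.enumerate_cons, List.foldl]
      rw [show aStep acc (3 * ((k : Int) + 1), a)
            = acc ++ " " ++ pvCode a from by
            simp only [aStep]; rw [cond_mul3 (3 * ((k : Int) + 1)) (by omega) (by omega)]; simp,
          show ∀ r, aStep r (3 * ((k : Int) + 1) + 1, b) = r ++ pvCode b from fun r => by
            simp only [aStep]; rw [cond_other (3 * ((k : Int) + 1) + 1) (Or.inl (by omega))]; simp,
          show ∀ r, aStep r (3 * ((k : Int) + 1) + 1 + 1, c) = r ++ pvCode c from fun r => by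
            simp only [aStep]; rw [cond_other (3 * ((k : Int) + 1) + 1 + 1) (Or.inl (by omega))]; simp,
          show (3 * ((k : Int) + 1) + 1 + 1 + 1) = 3 * (((k + 1 : Nat) : Int) + 1) from by
            push_cast; ring,
          ih (k + 1)]
      simp [tailL, chunks3, grpL, String.toList_append]

lemma join_space (g : List Char) (gs : List (List Char)) :
    PySem.Chars.join [' '] (g :: gs) = g ++ (gs.map (fun h => ' ' :: h)).flatten := by
  induction gs generalizing g with
  | nil => simp [PySem.Chars.join_singleton]
  | cons h t ih => rw [PySem.Chars.join_cons_cons, ih]; simp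

lemma join_nil_sep (ps : List (List Char)) :
    PySem.Chars.join [] ps = ps.flatten := by
  induction ps with
  | nil => simp [PySem.Chars.join_nil]
  | cons p t ih =>
      cases t with
      | nil => simp [PySem.Chars.join_singleton]
      | cons q r => rw [PySem.Chars.join_cons_cons, ih]; simp

lemma A_list (l : List Char) :
    (List.foldl aStep "" (PySem.List.enumerate l 0)).toList
      = PySem.Chars.join [' '] ((chunks3 l).map grpL) := by
  cases l with
  | nil => simp [PySem.List.enumerate_nil, chunks3, PySem.Chars.join_nil]
  | cons a t =>
    cases t with
    | nil =>
        simp only [PySem.List.enumerate_cons, PySem.List.enumerate_nil, List.foldl]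
        rw [show aStep "" ((0 : Int), a) = "" ++ pvCode a from by
              simp only [aStep]; rw [cond_other 0 (Or.inr rfl)]; simp]
        simp [chunks3, grpL, PySem.Chars.join_singleton]
    | cons b t' =>
      cases t' with
      | nil =>
          simp only [PySem.List.enumerate_cons, PySem.List.enumerate_nil, List.foldl]
          rw [show aStep "" ((0 : Int), a) = "" ++ pvCode a from by
                simp only [aStep]; rw [cond_other 0 (Or.inr rfl)]; simp,
              show ∀ r, aStep r ((0 : Int) + 1, b) = r ++ pvCode b from fun r => by
                simp only [aStep]; rw [cond_other (0 + 1) (Or.inl (by omega))]; simp]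
          simp [chunks3, grpL, PySem.Chars.join_singleton, String.toList_append]
      | cons c rest =>
          simp only [PySem.List.enumerate_cons, List.foldl]
          rw [show aStep "" ((0 : Int), a) = "" ++ pvCode a from by
                simp only [aStep]; rw [cond_other 0 (Or.inr rfl)]; simp,
              show ∀ r, aStep r ((0 : Int) + 1, b) = r ++ pvCode b from fun r => by
                simp only [aStep]; rw [cond_other (0 + 1) (Or.inl (by omega))]; simp,
              show ∀ r, aStep r ((0 : Int) + 1 + 1, c) = r ++ pvCode c from fun r => by
                simp only [aStep]; rw [cond_other (0 + 1 + 1) (Or.inl (by omega))]; simp,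
              show ((0 : Int) + 1 + 1 + 1) = 3 * (((0 : Nat) : Int) + 1) from by norm_num,
              tailA rest 0]
          rw [show chunks3 (a :: b :: c :: rest) = [a, b, c] :: chunks3 rest from rfl,
              List.map_cons, join_space]
          simp [tailL, grpL, String.toList_append, List.map_map, Function.comp_def]

-- B's recursive grouping computes exactly the chunk encodings
lemma B_group_head (t : List Char) :
    (PySem.Str.join "" (t.map pvCodeB)).toList = grpLB t := by
  rw [PySem.Str.toList_join, show (String.toList "") = [] from rfl, List.map_map,
      join_nil_sep]
  rfl

lemma loop_eq (t : List Char) : ∀ gs : List String,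
    pvGroupsLoop t gs = gs ++ pvGroupsB t := by
  induction t using chunks3.induct with
  | case1 => intro gs; rw [pvGroupsLoop, pvGroupsB]; simp
  | case2 a =>
      intro gs
      rw [pvGroupsLoop, pvGroupsB]
      simp only [List.drop_succ_cons, List.drop_nil, List.take]
      rw [pvGroupsLoop, pvGroupsB]
  | case3 a b =>
      intro gs
      rw [pvGroupsLoop, pvGroupsB]
      simp only [List.drop_succ_cons, List.drop_nil, List.take]
      rw [pvGroupsLoop, pvGroupsB]
  | case4 a b c rest ih =>
      intro gs
      rw [pvGroupsLoop, pvGroupsB]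
      simp only [List.take, List.drop]
      rw [ih]
      simp

lemma B_groups (l : List Char) :
    (pvGroupsB l).map String.toList = (chunks3 l).map grpLB := by
  induction l using chunks3.induct with
  | case1 => rw [pvGroupsB]; rfl
  | case2 a =>
      rw [pvGroupsB]
      show (PySem.Str.join "" ([a].map pvCodeB)).toList
            :: (pvGroupsB ([] : List Char)).map String.toList = [grpLB [a]]
      rw [B_group_head, pvGroupsB]
      rfl
  | case3 a b =>
      rw [pvGroupsB]
      show (PySem.Str.join "" ([a, b].map pvCodeB)).toList
            :: (pvGroupsB ([] : List Char)).map String.toList = [grpLB [a, b]]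
      rw [B_group_head, pvGroupsB]
      rfl
  | case4 a b c rest ih =>
      rw [pvGroupsB]
      show (PySem.Str.join "" ([a, b, c].map pvCodeB)).toList
            :: (pvGroupsB rest).map String.toList
          = grpLB [a, b, c] :: (chunks3 rest).map grpLB
      rw [B_group_head, ih]

lemma B_list (s : String) :
    (convert_to_plaintext_alt s).toList
      = PySem.Chars.join [' ']
          ((chunks3 ((PySem.Str.upper s).toList)).map grpLB) := by
  simp only [convert_to_plaintext_alt]
  rw [loop_eq, List.nil_append, PySem.Str.toList_join,
      show (String.toList " ") = [' '] from rfl]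
  exact congrArg _ (B_groups ((PySem.Str.upper s).toList))

-- on letters and the space the table lookup and the arithmetic code agree
lemma code_eq (c : Char) (h : c = ' ' ∨ ('A' ≤ c ∧ c ≤ 'Z')) : pvCode c = pvCodeB c := by
  rcases h with h | ⟨h1, h2⟩
  · subst h; decide
  · have hn1 : 65 ≤ c.toNat := h1
    have hn2 : c.toNat ≤ 90 := h2
    rw [(Char.ofNat_toNat c).symm]
    set n := c.toNat with hn
    clear_value n
    interval_cases n <;> decide

-- upper-casing a letter or space yields a character on which code_eq applies
lemma upperChar_P (c : Char)
    (h : (c == ' ' || ('A' ≤ c && c ≤ 'Z') || ('a' ≤ c && c ≤ 'z')) = true) :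
    PySem.Chars.upperChar c = ' ' ∨
      ('A' ≤ PySem.Chars.upperChar c ∧ PySem.Chars.upperChar c ≤ 'Z') := by
  simp only [Bool.or_eq_true, Bool.and_eq_true, beq_iff_eq, decide_eq_true_eq] at h
  rcases h with (rfl | ⟨h1, h2⟩) | ⟨h1, h2⟩
  · decide
  · have hn1 : 65 ≤ c.toNat := h1
    have hn2 : c.toNat ≤ 90 := h2
    rw [(Char.ofNat_toNat c).symm]; set n := c.toNat with hn; clear_value n
    interval_cases n <;> decide
  · have hn1 : 97 ≤ c.toNat := h1
    have hn2 : c.toNat ≤ 122 := h2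
    rw [(Char.ofNat_toNat c).symm]; set n := c.toNat with hn; clear_value n
    interval_cases n <;> decide

-- every chunk's characters come from the original list
lemma chunks3_mem (l : List Char) :
    ∀ ch ∈ chunks3 l, ∀ c ∈ ch, c ∈ l := by
  induction l using chunks3.induct with
  | case1 => simp [chunks3]
  | case2 a => simp [chunks3]
  | case3 a b => simp [chunks3]
  | case4 a b c rest ih =>
      intro ch hch x hx
      rcases List.mem_cons.mp hch with rfl | h
      · simp only [List.mem_cons, List.not_mem_nil, or_false] at hx
        rcases hx with rfl | rfl | rfl <;> simp
      · exact List.mem_cons_of_mem _ (List.mem_cons_of_mem _ (List.mem_cons_of_mem _ (ih ch h x hx)))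

-- ===== VERDICT (by name: the statement is the Claim_ definition above) =====
theorem convert_to_plaintext_spec : Claim_equal_convert_to_plaintext := by
  intro s _ hpre
  unfold Spec_convert_to_plaintext
  apply String.toList_inj.mp
  rw [A_eq_enum, A_list, B_list]
  apply congrArg
  apply List.map_congr_left
  intro ch hch
  unfold grpL grpLB
  apply congrArg
  apply List.map_congr_left
  intro c hc
  have hmem : c ∈ (PySem.Str.upper s).toList :=
    chunks3_mem _ ch hch c hc
  rw [PySem.Str.toList_upper, show PySem.Chars.upper s.toList
        = s.toList.map PySem.Chars.upperChar from by simp [PySem.Chars.upper]] at hmem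
  rcases List.mem_map.mp hmem with ⟨x, hx, rfl⟩
  have hpx := List.all_eq_true.mp hpre x hx
  rw [code_eq _ (upperChar_P x hpx)]
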